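-- pv_equiv track=rewrite | github.com/nihaaljangam-glitch/hackathon | backend.py | ai_autoflag
-- ===== SOURCE A (Python) =====
-- BANNED_WORDS = ["trash", "idiot", "hate", "stupid", "nonsense"]
--
-- def ai_autoflag(text: str) -> bool:
--     if not text:
--         return False
--     t = text.lower()
--     for bad in BANNED_WORDS:
--         if bad in t:
--             return True
--     return False
-- ===== SOURCE B (Python) =====
-- BANNED_WORDS = ["trash", "idiot", "hate", "stupid", "nonsense"]
--
-- def ai_autoflag(text: str) -> bool:
--     # Streaming multi-pattern matcher: one pass over the text, maintaining the
--     # set of banned-word suffixes still being matched; no substring scans.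
--     pending = []  # suffixes of banned words whose matched prefix ends here
--     for c in text.lower():
--         nxt = []
--         for rem in pending + BANNED_WORDS:
--             if rem[0] == c:
--                 rest = rem[1:]
--                 if not rest:
--                     return True
--                 nxt.append(rest)
--         pending = nxt
--     return False
-- ===== Notes on version B (the rewrite author's own statement) =====
-- stated objective: alternative
-- what changed: B replaces A's per-word substring scans by a streaming multi-pattern matcher: one pass over the lowered text maintaining the set of banned-word suffixes still being matched (NFA-style state set), with no substring search at all.
import Mathlib
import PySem

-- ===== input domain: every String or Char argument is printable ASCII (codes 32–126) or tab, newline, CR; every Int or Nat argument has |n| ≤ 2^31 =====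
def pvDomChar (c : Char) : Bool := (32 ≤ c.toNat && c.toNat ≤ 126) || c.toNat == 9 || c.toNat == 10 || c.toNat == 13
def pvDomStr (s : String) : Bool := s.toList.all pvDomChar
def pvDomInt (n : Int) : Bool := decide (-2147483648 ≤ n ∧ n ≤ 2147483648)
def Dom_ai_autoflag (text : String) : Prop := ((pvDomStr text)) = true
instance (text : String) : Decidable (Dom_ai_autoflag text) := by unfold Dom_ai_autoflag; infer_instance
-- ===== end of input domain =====

-- B replaces A's per-word substring scans by a single streaming pass that maintains the set
-- of banned-word suffixes still being matched (alternative algorithm, same behaviour).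

-- ===== PORT A =====
def bannedWords : List String := ["trash", "idiot", "hate", "stupid", "nonsense"]

def ai_autoflag (text : String) : Bool :=
  if text = "" then false
  else
    let t := PySem.Str.lower text
    bannedWords.any (fun bad => PySem.Str.isIn bad t)

-- ===== PORT B =====
def bannedPatterns : List (List Char) :=
  ["trash".toList, "idiot".toList, "hate".toList, "stupid".toList, "nonsense".toList]

-- B's inner for-loop over `pending + BANNED_WORDS`: left-to-right; `none` models the
-- early `return True` on a completed word, `some nxt` the next pending set.
def bFeed (c : Char) : List (List Char) → Option (List (List Char))
  | [] => some []
  | [] :: rest => bFeed c rest   -- unreachable: pending entries and banned words are nonempty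
  | (r :: rs) :: rest =>
      if r = c then
        if rs = [] then none
        else
          match bFeed c rest with
          | none => none
          | some nxt => some (rs :: nxt)
      else bFeed c rest

-- B's outer for-loop over the lowered text, threading the pending set.
def bLoop : List Char → List (List Char) → Bool
  | [], _ => false
  | c :: rest, pending =>
      match bFeed c (pending ++ bannedPatterns) with
      | none => true
      | some nxt => bLoop rest nxt

def ai_autoflag_alt (text : String) : Bool :=
  bLoop (PySem.Chars.lower text.toList) []

-- ===== PRECONDITION & SPEC =====
def Spec_ai_autoflag (text : String) (out : Bool) : Prop := out = ai_autoflag_alt text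
instance (text : String) (out : Bool) : Decidable (Spec_ai_autoflag text out) := by unfold Spec_ai_autoflag; infer_instance

-- ===== CLAIM (what is proved, stated in full; the proofs are below) =====
def Claim_equal_ai_autoflag : Prop := ∀ (text : String), Dom_ai_autoflag text → Spec_ai_autoflag text (ai_autoflag text)

-- ===== LEMMAS AND PROOFS =====

theorem bFeed_none_iff (c : Char) (L : List (List Char)) :
    bFeed c L = none ↔ [c] ∈ L := by
  induction L with
  | nil => simp [bFeed]
  | cons rem rest ih =>
      cases rem with
      | nil => simpa [bFeed] using ih
      | cons r rs =>
          by_cases hr : r = c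
          · by_cases hrs : rs = []
            · subst hr; subst hrs; simp [bFeed]
            · simp only [bFeed, if_pos hr, if_neg hrs]
              cases hfd : bFeed c rest with
              | none => simp [ih.1 hfd]
              | some nxt =>
                  have hnc : ¬ [c] ∈ rest := fun h => by simp [ih.2 h] at hfd
                  simp [hnc, hr, hrs]
          · simp only [bFeed, if_neg hr, ih]
            constructor
            · exact fun h => List.mem_cons_of_mem _ h
            · intro h
              rcases List.mem_cons.1 h with h | h
              · cases h; simp at hr
              · exact h

theorem bFeed_some_mem (c : Char) (L nxt : List (List Char))
    (h : bFeed c L = some nxt) (rs : List Char) :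
    rs ∈ nxt ↔ rs ≠ [] ∧ (c :: rs) ∈ L := by
  induction L generalizing nxt with
  | nil =>
      simp only [bFeed, Option.some.injEq] at h
      subst h; simp
  | cons rem rest ih =>
      cases rem with
      | nil =>
          simp only [bFeed] at h
          simp only [ih nxt h, List.mem_cons]
          constructor
          · rintro ⟨h1, h2⟩; exact ⟨h1, Or.inr h2⟩
          · rintro ⟨h1, h2 | h2⟩
            · simp at h2
            · exact ⟨h1, h2⟩
      | cons r rs' =>
          by_cases hr : r = c
          · by_cases hrs : rs' = []
            · simp [bFeed, hr, hrs] at h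
            · subst hr
              cases hfd : bFeed r rest with
              | none => simp [bFeed, hfd, hrs] at h
              | some nxt' =>
                  simp only [bFeed, hfd, if_neg hrs, if_true, Option.some.injEq] at h
                  subst h
                  simp only [List.mem_cons, ih nxt' hfd]
                  constructor
                  · rintro (rfl | ⟨h1, h2⟩)
                    · exact ⟨hrs, Or.inl rfl⟩
                    · exact ⟨h1, Or.inr h2⟩
                  · rintro ⟨h1, h2 | h2⟩
                    · injection h2 with _ h2'; exact Or.inl h2'
                    · exact Or.inr ⟨h1, h2⟩
          · simp only [bFeed, if_neg hr] at h
            simp only [ih nxt h, List.mem_cons]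
            constructor
            · rintro ⟨h1, h2⟩; exact ⟨h1, Or.inr h2⟩
            · rintro ⟨h1, h2 | h2⟩
              · injection h2 with hc _; exact absurd hc.symm hr
              · exact ⟨h1, h2⟩

theorem banned_ne_nil : ∀ w ∈ bannedPatterns, w ≠ [] := by decide

theorem bLoop_iff (s : List Char) :
    ∀ P : List (List Char), bLoop s P = true ↔
      (∃ rem ∈ P, rem ≠ [] ∧ rem <+: s) ∨ (∃ w ∈ bannedPatterns, w <:+: s) := by
  induction s with
  | nil =>
      intro P
      rw [show bLoop [] P = false from rfl]
      simp only [Bool.false_eq_true, false_iff]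
      rintro (⟨rem, _, h1, hp⟩ | ⟨w, hw, hi⟩)
      · exact h1 (List.prefix_nil.1 hp)
      · exact banned_ne_nil w hw (List.infix_nil.1 hi)
  | cons c rest ih =>
      intro P
      simp only [bLoop]
      cases hfd : bFeed c (P ++ bannedPatterns) with
      | none =>
          have hc : [c] ∈ P ++ bannedPatterns := (bFeed_none_iff _ _).1 hfd
          simp only [true_iff]
          rcases List.mem_append.1 hc with h | h
          · exact Or.inl ⟨[c], h, by simp, by simp⟩
          · exact Or.inr ⟨[c], h, ⟨[], rest, rfl⟩⟩
      | some nxt =>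
          have hmem := bFeed_some_mem c (P ++ bannedPatterns) nxt hfd
          have hno : ¬ [c] ∈ P ++ bannedPatterns := by
            intro h; rw [(bFeed_none_iff _ _).2 h] at hfd; cases hfd
          rw [ih nxt]
          constructor
          · rintro (⟨rs, hrs, hne, hp⟩ | ⟨w, hw, hi⟩)
            · rcases List.mem_append.1 ((hmem rs).1 hrs).2 with h | h
              · exact Or.inl ⟨c :: rs, h, by simp, List.cons_prefix_cons.2 ⟨rfl, hp⟩⟩
              · exact Or.inr ⟨c :: rs, h, (List.cons_prefix_cons.2 ⟨rfl, hp⟩).isInfix⟩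
            · exact Or.inr ⟨w, hw, hi.trans (List.suffix_cons c rest).isInfix⟩
          · rintro (⟨rem, hr, hne, hp⟩ | ⟨w, hw, hi⟩)
            · cases rem with
              | nil => exact absurd rfl hne
              | cons r rs =>
                  obtain ⟨rfl, hp'⟩ := List.cons_prefix_cons.1 hp
                  cases rs with
                  | nil => exact absurd (List.mem_append_left _ hr) hno
                  | cons x xs =>
                      exact Or.inl ⟨x :: xs,
                        (hmem _).2 ⟨by simp, List.mem_append_left _ hr⟩, by simp, hp'⟩
            · rcases List.infix_cons_iff.1 hi with hp | hi'
              · cases w with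
                | nil => exact absurd rfl (banned_ne_nil _ hw)
                | cons r rs =>
                    obtain ⟨rfl, hp'⟩ := List.cons_prefix_cons.1 hp
                    cases rs with
                    | nil => exact absurd (List.mem_append_right _ hw) hno
                    | cons x xs =>
                        exact Or.inl ⟨x :: xs,
                          (hmem _).2 ⟨by simp, List.mem_append_right _ hw⟩, by simp, hp'⟩
              · exact Or.inr ⟨w, hw, hi'⟩

theorem pats_eq : bannedPatterns = bannedWords.map String.toList := by decide

-- ===== VERDICT (by name: the statement is the Claim_ definition above) =====
theorem ai_autoflag_spec : Claim_equal_ai_autoflag := by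
  intro text _
  unfold Spec_ai_autoflag ai_autoflag ai_autoflag_alt
  by_cases h : text = ""
  · subst h; simp [bLoop, PySem.Chars.lower]
  · simp only [h, if_false]
    rw [Bool.eq_iff_iff]
    simp only [List.any_eq_true, PySem.Str.isIn_iff_infix, bLoop_iff, pats_eq, List.mem_map]
    constructor
    · rintro ⟨w, hw, hi⟩
      exact Or.inr ⟨w.toList, ⟨w, hw, rfl⟩, by simpa [PySem.Str.lower] using hi⟩
    · rintro (⟨rem, hr, _, _⟩ | ⟨_, ⟨w, hw, rfl⟩, hi⟩)
      · simp at hr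
      · exact ⟨w, hw, by simpa [PySem.Str.lower] using hi⟩
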